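-- pv_equiv track=rewrite | github.com/yruefenacht/advent-of-code-2019 | day04/day04.py | has_extra
-- ===== SOURCE A (Python) =====
-- def has_extra(string, count):
--     for i in string:
--         c = 0
--         for j in string:
--             if i == j:
--                 c += 1
--         if c == count:
--             return True
--     return False
-- ===== SOURCE B (Python) =====
-- def has_extra(string, count):
--     counts = {}
--     for ch in string:
--         counts[ch] = counts.get(ch, 0) + 1
--     return count in counts.values()
-- ===== Notes on version B (the rewrite author's own statement) =====
-- stated objective: faster
-- what changed: Replaces the quadratic per-character full rescan with a single pass that builds a character-count dictionary once and then tests membership of count among its values.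
import Mathlib
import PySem

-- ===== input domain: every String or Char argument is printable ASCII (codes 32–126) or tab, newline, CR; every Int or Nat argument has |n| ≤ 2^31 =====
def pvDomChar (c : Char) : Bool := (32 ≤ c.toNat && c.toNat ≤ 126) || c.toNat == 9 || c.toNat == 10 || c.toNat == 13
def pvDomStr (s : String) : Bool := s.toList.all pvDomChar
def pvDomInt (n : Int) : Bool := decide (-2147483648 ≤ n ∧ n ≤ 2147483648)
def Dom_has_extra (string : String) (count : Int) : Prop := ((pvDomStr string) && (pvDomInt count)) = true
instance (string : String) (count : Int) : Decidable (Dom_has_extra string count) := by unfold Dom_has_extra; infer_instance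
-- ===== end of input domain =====

-- B replaces A's per-character full rescan of the string with a single pass building a
-- character-count dictionary, then tests whether count is among its values (faster: O(n) vs O(n^2)).

-- ===== PORT A =====
-- inner loop: c = 0; for j in string: if i == j: c += 1
def pvAInner (full : List Char) (i : Char) : Int :=
  full.foldl (fun c j => if i == j then c + 1 else c) 0

-- outer loop with early return True
def pvAOuter (full : List Char) (count : Int) : List Char → Bool
  | [] => false
  | i :: rest => if pvAInner full i == count then true else pvAOuter full count rest

def has_extra (string : String) (count : Int) : Bool :=
  pvAOuter string.toList count string.toList

-- ===== PORT B =====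
def has_extra_alt (string : String) (count : Int) : Bool :=
  let counts : PySem.Dict Char Int :=
    string.toList.foldl (fun d ch => d.insert ch (d.getD ch 0 + 1)) PySem.Dict.empty
  (PySem.Dict.values counts).contains count

-- ===== PRECONDITION & SPEC =====
def Spec_has_extra (string : String) (count : Int) (out : Bool) : Prop := out = has_extra_alt string count
instance (string : String) (count : Int) (out : Bool) : Decidable (Spec_has_extra string count out) := by unfold Spec_has_extra; infer_instance

-- ===== CLAIM (what is proved, stated in full; the proofs are below) =====
def Claim_equal_has_extra : Prop := ∀ (string : String) (count : Int), Dom_has_extra string count → Spec_has_extra string count (has_extra string count)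

-- ===== LEMMAS AND PROOFS =====
theorem pvAInner_eq_count (full : List Char) (i : Char) :
    pvAInner full i = (full.count i : Int) := by
  unfold pvAInner
  rw [PySem.List.foldl_count_if (fun j => i == j) full 0]
  simp [List.count, BEq.comm]

theorem pvAOuter_eq_any (full : List Char) (count : Int) (l : List Char) :
    pvAOuter full count l = l.any (fun i => pvAInner full i == count) := by
  induction l with
  | nil => rfl
  | cons i rest ih =>
    simp only [pvAOuter, List.any_cons, ih]
    by_cases h : pvAInner full i == count <;> simp [h]

theorem has_extra_alt_eq_any (string : String) (count : Int) :
    has_extra_alt string count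
      = (PySem.Set.ofList string.toList).any (fun k => (string.toList.count k : Int) == count) := by
  unfold has_extra_alt
  rw [PySem.Dict.foldl_insert_getD_add_one_eq_counter]
  simp only [PySem.Dict.values, PySem.Dict.items_counter, List.map_map]
  rw [List.contains_eq_any_beq, List.any_map]
  exact List.any_congr rfl (fun k => by simp [Function.comp, BEq.comm])

-- ===== VERDICT (by name: the statement is the Claim_ definition above) =====
theorem has_extra_spec : Claim_equal_has_extra := by
  unfold Claim_equal_has_extra
  intro string count _
  unfold Spec_has_extra
  rw [has_extra_alt_eq_any]
  unfold has_extra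
  rw [pvAOuter_eq_any]
  simp only [pvAInner_eq_count]
  apply Bool.eq_iff_iff.mpr
  simp only [List.any_eq_true, PySem.Set.mem_ofList]
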